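-- pv_equiv track=rewrite | github.com/c-kk/aoc | 2020/day23/backup/game.py | pick_three_cups
-- ===== SOURCE A (Python) =====
-- def pick_three_cups(arrangement, current):
-- 	current_index = arrangement.index(current)
-- 	three_cups = []
-- 	for i in range(1, 4):
-- 		pick_index = (current_index + i) % len(arrangement)
-- 		cup = arrangement[pick_index]
-- 		three_cups.append(cup)
-- 	return three_cups
-- ===== SOURCE B (Python) =====
-- def pick_three_cups(arrangement, current):
-- 	idx = arrangement.index(current)
-- 	return (arrangement * 4)[idx + 1 : idx + 4]
-- ===== Notes on version B (the rewrite author's own statement) =====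
-- stated objective: idiomatic
-- what changed: Replaces the explicit loop with per-element modular index arithmetic by a single slice of the quadrupled list, letting list repetition handle the circular wrap.
import Mathlib
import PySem

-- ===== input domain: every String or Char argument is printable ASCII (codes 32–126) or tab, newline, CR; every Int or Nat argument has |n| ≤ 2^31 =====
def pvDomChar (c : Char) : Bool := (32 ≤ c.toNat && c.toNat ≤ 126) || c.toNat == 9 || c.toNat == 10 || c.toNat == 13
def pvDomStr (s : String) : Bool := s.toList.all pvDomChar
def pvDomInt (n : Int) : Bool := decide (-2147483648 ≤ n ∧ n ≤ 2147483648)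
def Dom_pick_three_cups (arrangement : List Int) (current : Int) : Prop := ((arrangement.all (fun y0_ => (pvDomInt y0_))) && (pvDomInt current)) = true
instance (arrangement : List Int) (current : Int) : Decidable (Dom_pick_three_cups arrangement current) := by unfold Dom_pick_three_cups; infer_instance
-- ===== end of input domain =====

-- B replaces A's loop of modular index lookups by one slice of the quadrupled list (idiomatic; same cost).

-- ===== PORT A =====
-- A: current_index = arrangement.index(current); loop i in range(1,4) appending arrangement[(current_index+i) % len]
def pick_three_cups (arrangement : List Int) (current : Int) : List Int :=
  match PySem.List.index? arrangement current with
  | none => []  -- Python raises ValueError here; excluded by Pre_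
  | some current_index =>
    (PySem.List.pyRange 1 4 1).foldl (fun three_cups i =>
      let pick_index := PySem.Int.mod ((current_index : Int) + i) ((arrangement.length : Int))
      match PySem.List.pyGet? arrangement pick_index with
      | some cup => three_cups ++ [cup]
      | none => three_cups) []  -- pyGet? is always some here (index is a modulus)

-- ===== PORT B =====
-- B: idx = arrangement.index(current); return (arrangement * 4)[idx+1 : idx+4]
def pick_three_cups_alt (arrangement : List Int) (current : Int) : List Int :=
  match PySem.List.index? arrangement current with
  | none => []  -- Python raises ValueError here; excluded by Pre_
  | some idx =>
    PySem.List.slice (arrangement ++ arrangement ++ arrangement ++ arrangement)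
      (some ((idx : Int) + 1)) (some ((idx : Int) + 4))

-- ===== PRECONDITION & SPEC =====
-- Pre_ excludes exactly the inputs where Python A raises ValueError (current not in the list).
def Pre_pick_three_cups (arrangement : List Int) (current : Int) : Prop := current ∈ arrangement
instance (arrangement : List Int) (current : Int) : Decidable (Pre_pick_three_cups arrangement current) := by unfold Pre_pick_three_cups; infer_instance
def pvWitness_pick_three_cups : List Int × Int := ([3, 8, 9, 1, 2, 5, 4, 6, 7], 8)

def Spec_pick_three_cups (arrangement : List Int) (current : Int) (out : List Int) : Prop := out = pick_three_cups_alt arrangement current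
instance (arrangement : List Int) (current : Int) (out : List Int) : Decidable (Spec_pick_three_cups arrangement current out) := by unfold Spec_pick_three_cups; infer_instance

-- ===== CLAIM (what is proved, stated in full; the proofs are below) =====
def Claim_equal_pick_three_cups : Prop := ∀ (arrangement : List Int) (current : Int), Dom_pick_three_cups arrangement current → Pre_pick_three_cups arrangement current → Spec_pick_three_cups arrangement current (pick_three_cups arrangement current)

-- ===== LEMMAS AND PROOFS =====

lemma get_mod (a : List Int) (hn : 0 < a.length) (m : Nat) :
    PySem.List.pyGet? a (PySem.Int.mod ((m : Int)) ((a.length : Int))) = some (a[m % a.length]'(Nat.mod_lt _ hn)) := by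
  rw [PySem.Int.mod_eq_emod_of_pos (by exact_mod_cast hn), ← Int.natCast_mod, PySem.List.pyGet?_natCast]
  simp [List.getElem?_eq_getElem (Nat.mod_lt _ hn)]

lemma quad_getElem (a : List Int) (j : Nat) (hn : 0 < a.length) (hj : j < 4 * a.length) :
    (a ++ a ++ a ++ a)[j]'(by simp; omega) = a[j % a.length]'(Nat.mod_lt _ hn) := by
  have hL : ∀ (x y : List Int) (i : Nat) (h : i < x.length), (x ++ y)[i]'(by simp; omega) = x[i] := by
    intro x y i h; rw [List.getElem_append_left h]
  rcases Nat.lt_or_ge j a.length with h1 | h1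
  · have hm : j % a.length = j := Nat.mod_eq_of_lt h1
    rw [hL _ _ _ (by simp; omega), hL _ _ _ (by simp; omega), hL _ _ _ h1]
    simp [hm]
  · rcases Nat.lt_or_ge j (2 * a.length) with h2 | h2
    · have hm : j % a.length = j - a.length := by
        rw [Nat.mod_eq_sub_mod h1]; exact Nat.mod_eq_of_lt (by omega)
      rw [hL _ _ _ (by simp; omega), hL _ _ _ (by simp; omega),
        List.getElem_append_right (by omega)]
      simp [hm]
    · rcases Nat.lt_or_ge j (3 * a.length) with h3 | h3
      · have hm : j % a.length = j - 2 * a.length := by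
          rw [Nat.mod_eq_sub_mod h1, Nat.mod_eq_sub_mod (by omega)]
          rw [show j - a.length - a.length = j - 2 * a.length by omega]
          exact Nat.mod_eq_of_lt (by omega)
        rw [hL _ _ _ (by simp; omega), List.getElem_append_right (by simp; omega)]
        simp only [List.length_append]
        congr 1; omega
      · have hm : j % a.length = j - 3 * a.length := by
          rw [Nat.mod_eq_sub_mod h1, Nat.mod_eq_sub_mod (by omega), Nat.mod_eq_sub_mod (by omega)]
          rw [show j - a.length - a.length - a.length = j - 3 * a.length by omega]
          exact Nat.mod_eq_of_lt (by omega)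
        rw [List.getElem_append_right (by simp; omega)]
        simp only [List.length_append]
        congr 1; omega

lemma a_side (a : List Int) (idx : Nat) (hidx : idx < a.length) :
    (PySem.List.pyRange 1 4 1).foldl (fun three_cups i =>
      let pick_index := PySem.Int.mod ((idx : Int) + i) ((a.length : Int))
      match PySem.List.pyGet? a pick_index with
      | some cup => three_cups ++ [cup]
      | none => three_cups) []
    = [a[(idx+1) % a.length]'(Nat.mod_lt _ (by omega)),
       a[(idx+2) % a.length]'(Nat.mod_lt _ (by omega)),
       a[(idx+3) % a.length]'(Nat.mod_lt _ (by omega))] := by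
  have hn : 0 < a.length := by omega
  have hr : PySem.List.pyRange 1 4 1 = [1,2,3] := by decide
  rw [hr]
  simp only [List.foldl]
  have e1 : (idx : Int) + 1 = ((idx + 1 : Nat) : Int) := by push_cast; ring
  have e2 : (idx : Int) + 2 = ((idx + 2 : Nat) : Int) := by push_cast; ring
  have e3 : (idx : Int) + 3 = ((idx + 3 : Nat) : Int) := by push_cast; ring
  rw [e1, e2, e3, get_mod a hn, get_mod a hn, get_mod a hn]
  rfl

lemma b_side (a : List Int) (idx : Nat) (hidx : idx < a.length) :
    PySem.List.slice (a ++ a ++ a ++ a) (some ((idx : Int) + 1)) (some ((idx : Int) + 4))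
    = [a[(idx+1) % a.length]'(Nat.mod_lt _ (by omega)),
       a[(idx+2) % a.length]'(Nat.mod_lt _ (by omega)),
       a[(idx+3) % a.length]'(Nat.mod_lt _ (by omega))] := by
  have hn : 0 < a.length := by omega
  have e1 : (idx : Int) + 1 = ((idx + 1 : Nat) : Int) := by push_cast; ring
  have e4 : (idx : Int) + 4 = ((idx + 1 : Nat) : Int) + ((3 : Nat) : Int) := by push_cast; ring
  rw [e1, e4, PySem.List.slice_natCast_add]
  have hlen : (a ++ a ++ a ++ a).length = 4 * a.length := by simp; omega
  have h1 : idx + 1 < (a ++ a ++ a ++ a).length := by omega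
  have h2 : idx + 2 < (a ++ a ++ a ++ a).length := by omega
  have h3 : idx + 3 < (a ++ a ++ a ++ a).length := by omega
  rw [List.drop_eq_getElem_cons h1, List.drop_eq_getElem_cons h2, List.drop_eq_getElem_cons h3]
  rw [quad_getElem a _ hn (by omega), quad_getElem a _ hn (by omega), quad_getElem a _ hn (by omega)]
  rfl

-- ===== VERDICT (by name: the statement is the Claim_ definition above) =====
theorem pick_three_cups_spec : Claim_equal_pick_three_cups := by
  intro a current _hdom hpre
  unfold Spec_pick_three_cups pick_three_cups pick_three_cups_alt
  obtain ⟨idx, hix⟩ := (PySem.List.index?_isSome_iff a current).mpr hpre |> Option.isSome_iff_exists.mp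
  rw [hix]
  dsimp only
  have hidx : idx < a.length := (PySem.List.getElem_of_index?_eq_some hix).1
  rw [a_side a idx hidx, b_side a idx hidx]
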